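-- pv_equiv track=rewrite | github.com/kangmg/simpledit-python-plugin | src/simpledit_python_plugin/calculation.py | split_sdf
-- ===== SOURCE A (Python) =====
-- from typing import Callable, List, Optional, Union
--
-- def split_sdf(sdf: str) -> List[str]:
--     """Split a multi-molecule SDF into a list of individual SDF blocks.
--
--     SDF files use ``$$$$`` as a record separator.  Each returned string is a
--     valid standalone SDF block with the terminator line included.
--
--     Useful for reactant/product pairs delivered as a single file.
--     """
--     blocks: List[str] = []
--     current: List[str] = []
--     for line in sdf.splitlines(keepends=True):
--         current.append(line)
--         if line.strip() == "$$$$":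
--             block = "".join(current).strip()
--             if block:
--                 blocks.append(block)
--             current = []
--     remainder = "".join(current).strip()
--     if remainder:
--         blocks.append(remainder)
--     return blocks
-- ===== SOURCE B (Python) =====
-- from typing import List
--
-- def split_sdf(sdf: str) -> List[str]:
--     """Split a multi-molecule SDF into standalone blocks (``$$$$`` kept)."""
--     def rec(lines: List[str]) -> List[str]:
--         for i, ln in enumerate(lines):
--             if ln.strip() == "$$$$":
--                 block = "".join(lines[:i + 1]).strip()
--                 rest = rec(lines[i + 1:])
--                 return [block] + rest if block else rest
--         tail = "".join(lines).strip()
--         return [tail] if tail else []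
--     return rec(sdf.splitlines(keepends=True))
-- ===== Notes on version B (the rewrite author's own statement) =====
-- stated objective: alternative
-- what changed: B replaces A's single accumulate-and-flush pass (growing a 'current' buffer and emptying it at each separator line) by recursive find-first-separator splitting: locate the first separator line, slice off that block, and recurse on the remaining lines.
import Mathlib
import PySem

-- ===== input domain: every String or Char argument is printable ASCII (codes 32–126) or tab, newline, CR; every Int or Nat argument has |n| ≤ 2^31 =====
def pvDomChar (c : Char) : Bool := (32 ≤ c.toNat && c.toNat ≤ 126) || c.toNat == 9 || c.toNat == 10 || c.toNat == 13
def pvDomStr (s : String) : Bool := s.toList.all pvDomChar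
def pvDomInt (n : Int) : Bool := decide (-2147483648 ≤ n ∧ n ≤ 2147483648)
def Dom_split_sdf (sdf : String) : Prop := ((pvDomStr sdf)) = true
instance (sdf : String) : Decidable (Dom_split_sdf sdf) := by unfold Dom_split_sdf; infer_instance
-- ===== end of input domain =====

-- B replaces A's accumulate-and-flush pass by recursive find-first-separator splitting; same cost, proved equal on Dom.


-- Shared helper: str.splitlines(keepends=True). Exact on the domain (only '\n', '\r', '\r\n'
-- occur as line boundaries in Dom strings; Python also breaks at \v,\f,\x1c-\x1e,… which Dom excludes).
def takeLine : List Char → List Char × List Char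
  | [] => ([], [])
  | '\n' :: rest => (['\n'], rest)
  | '\r' :: '\n' :: rest => (['\r', '\n'], rest)
  | '\r' :: rest => (['\r'], rest)
  | c :: rest => (c :: (takeLine rest).1, (takeLine rest).2)

theorem takeLine_snd_lt : ∀ (cs : List Char), cs ≠ [] → (takeLine cs).2.length < cs.length := by
  intro cs
  fun_induction takeLine cs with
  | case1 => intro h; exact absurd rfl h
  | case2 rest => intro _; simp
  | case3 rest => intro _; simp
  | case4 rest _ => intro _; simp
  | case5 c rest h1 h2 h3 ih =>
      intro _
      by_cases hr : rest = []
      · subst hr; simp [takeLine]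
      · have := ih hr; simp only [List.length_cons]; omega

def linesKE : List Char → List (List Char)
  | [] => []
  | c :: rest =>
      (takeLine (c :: rest)).1 :: linesKE (takeLine (c :: rest)).2
  termination_by cs => cs.length
  decreasing_by exact takeLine_snd_lt _ (by simp)

-- ===== PORT A =====
-- loop body of A's for-loop (state = (blocks, current))
def stepA (st : List String × List String) (line : String) : List String × List String :=
  let current := st.2 ++ [line]
  if PySem.Str.strip line == "$$$$" then
    let block := PySem.Str.strip (PySem.Str.join "" current)
    (if block ≠ "" then st.1 ++ [block] else st.1, [])
  else
    (st.1, current)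

-- A's code after the loop
def finishA (st : List String × List String) : List String :=
  let remainder := PySem.Str.strip (PySem.Str.join "" st.2)
  if remainder ≠ "" then st.1 ++ [remainder] else st.1

def split_sdf (sdf : String) : List String :=
  finishA (((linesKE sdf.toList).map (fun l => String.ofList l)).foldl stepA ([], []))

-- ===== PORT B =====
-- B's inner enumerate-loop: index of the first separator line, or none
def findSepIdx : List String → Nat → Option Nat
  | [], _ => none
  | ln :: rest, i =>
      if PySem.Str.strip ln == "$$$$" then some i else findSepIdx rest (i + 1)

theorem findSepIdx_ne_nil {lines : List String} {j i : Nat}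
    (h : findSepIdx lines j = some i) : lines ≠ [] := by
  intro hnil; subst hnil; simp [findSepIdx] at h

def splitBlocks (lines : List String) : List String :=
  match h : findSepIdx lines 0 with
  | some i =>
      let block := PySem.Str.strip (PySem.Str.join "" (PySem.List.slice lines none (some ((i : Int) + 1))))
      let rest := splitBlocks (PySem.List.slice lines (some ((i : Int) + 1)) none)
      if block ≠ "" then block :: rest else rest
  | none =>
      let tail := PySem.Str.strip (PySem.Str.join "" lines)
      if tail ≠ "" then [tail] else []
  termination_by lines.length
  decreasing_by
    have hne := findSepIdx_ne_nil h
    have : PySem.List.slice lines (some ((i : Int) + 1)) none = lines.drop (i + 1) := by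
      have : ((i : Int) + 1) = ((i + 1 : Nat) : Int) := by push_cast; ring
      rw [this, PySem.List.slice_from_natCast]
    rw [this]
    cases lines with
    | nil => exact absurd rfl hne
    | cons a as => simp [List.length_drop]

def split_sdf_alt (sdf : String) : List String :=
  splitBlocks ((linesKE sdf.toList).map (fun l => String.ofList l))

-- ===== PRECONDITION & SPEC =====
def Spec_split_sdf (sdf : String) (out : List String) : Prop := out = split_sdf_alt sdf
instance (sdf : String) (out : List String) : Decidable (Spec_split_sdf sdf out) := by unfold Spec_split_sdf; infer_instance

-- ===== CLAIM (what is proved, stated in full; the proofs are below) =====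
def Claim_equal_split_sdf : Prop := ∀ (sdf : String), Dom_split_sdf sdf → Spec_split_sdf sdf (split_sdf sdf)

-- ===== LEMMAS AND PROOFS =====

-- proof-side recursive characterisation carrying A's 'current' buffer explicitly
def recAux : List String → List String → List String
  | cur, [] =>
      let t := PySem.Str.strip (PySem.Str.join "" cur)
      if t ≠ "" then [t] else []
  | cur, ln :: rest =>
      if PySem.Str.strip ln == "$$$$" then
        let b := PySem.Str.strip (PySem.Str.join "" (cur ++ [ln]))
        (if b ≠ "" then [b] else []) ++ recAux [] rest
      else
        recAux (cur ++ [ln]) rest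

theorem lemA (lines blocks cur : List String) :
    finishA (lines.foldl stepA (blocks, cur)) = blocks ++ recAux cur lines := by
  induction lines generalizing blocks cur with
  | nil =>
      simp only [List.foldl_nil, finishA, recAux]
      split <;> simp
  | cons ln rest ih =>
      by_cases hsep : PySem.Str.strip ln == "$$$$"
      · simp only [List.foldl_cons, recAux, stepA, hsep, if_true, ih]
        split <;> simp
      · simp [List.foldl_cons, recAux, stepA, hsep, ih]

theorem findSepIdx_shift (ls : List String) (j : Nat) :
    findSepIdx ls j = (findSepIdx ls 0).map (j + ·) := by
  induction ls generalizing j with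
  | nil => simp [findSepIdx]
  | cons ln rest ih =>
      by_cases hsep : PySem.Str.strip ln == "$$$$"
      · simp [findSepIdx, hsep]
      · simp only [findSepIdx, hsep]
        rw [ih (j + 1), ih 1]
        cases findSepIdx rest 0 with
        | none => simp
        | some k => simp; omega

theorem lemUpTo (lines : List String) (i : Nat) (cur : List String)
    (h : findSepIdx lines 0 = some i) :
    recAux cur lines =
      (let b := PySem.Str.strip (PySem.Str.join "" (cur ++ lines.take (i + 1)))
       (if b ≠ "" then [b] else []) ++ recAux [] (lines.drop (i + 1))) := by
  induction lines generalizing i cur with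
  | nil => simp [findSepIdx] at h
  | cons ln rest ih =>
      by_cases hsep : PySem.Str.strip ln == "$$$$"
      · simp only [findSepIdx, hsep, if_true, Option.some.injEq] at h
        subst h
        simp [recAux, hsep]
      · simp only [findSepIdx, hsep] at h
        rw [findSepIdx_shift rest 1] at h
        cases hk : findSepIdx rest 0 with
        | none => rw [hk] at h; simp at h
        | some k =>
            rw [hk] at h; simp at h
            subst h
            rw [Nat.add_comm 1 k]
            simp only [recAux, hsep]
            rw [ih k (cur ++ [ln]) hk]
            simp [List.append_assoc]

theorem lemNoSep (lines cur : List String) (h : findSepIdx lines 0 = none) :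
    recAux cur lines =
      (let t := PySem.Str.strip (PySem.Str.join "" (cur ++ lines))
       if t ≠ "" then [t] else []) := by
  induction lines generalizing cur with
  | nil => simp [recAux]
  | cons ln rest ih =>
      by_cases hsep : PySem.Str.strip ln == "$$$$"
      · simp [findSepIdx, hsep] at h
      · simp only [findSepIdx, hsep] at h
        rw [findSepIdx_shift rest 1] at h
        cases hk : findSepIdx rest 0 with
        | some k => rw [hk] at h; simp at h
        | none =>
            simp only [recAux, hsep]
            rw [ih (cur ++ [ln]) hk]
            simp [List.append_assoc]

theorem lemB : ∀ (n : Nat) (lines : List String), lines.length ≤ n → splitBlocks lines = recAux [] lines := by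
  intro n
  induction n with
  | zero =>
      intro lines hl
      have : lines = [] := List.eq_nil_of_length_eq_zero (Nat.le_zero.mp hl)
      subst this
      simp [splitBlocks, findSepIdx, recAux]
  | succ n ihn =>
      intro lines hl
      rw [splitBlocks]
      split
      next i h =>
        have hne := findSepIdx_ne_nil h
        have hc : ((i : Int) + 1) = ((i + 1 : Nat) : Int) := by push_cast; ring
        rw [hc, PySem.List.slice_from_natCast, PySem.List.slice_to_natCast]
        rw [lemUpTo lines i [] h]
        have hlen : (lines.drop (i + 1)).length ≤ n := by
          cases lines with
          | nil => exact absurd rfl hne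
          | cons a as => simp only [List.length_drop] at *; simp at hl ⊢; omega
        rw [ihn (lines.drop (i + 1)) hlen]
        simp only [List.nil_append]
        split <;> simp
      next h =>
        rw [lemNoSep lines [] h]
        simp

-- ===== VERDICT (by name: the statement is the Claim_ definition above) =====
theorem split_sdf_spec : Claim_equal_split_sdf := by
  intro sdf _
  unfold Spec_split_sdf split_sdf split_sdf_alt
  rw [lemB _ _ (Nat.le_refl _), lemA, List.nil_append]
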